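-- pv_equiv track=rewrite | github.com/Bastard989/interview-analytics-agent-script-agent | scripts/quick_record_meeting.py | _parse_recipients
-- ===== SOURCE A (Python) =====
-- def _parse_recipients(raw_values: list[str]) -> list[str]:
--     recipients: list[str] = []
--     for value in raw_values:
--         for part in value.split(","):
--             email = part.strip()
--             if email:
--                 recipients.append(email)
--     return recipients
-- ===== SOURCE B (Python) =====
-- def _parse_recipients(raw_values: list[str]) -> list[str]:
--     # Single-pass character-level tokenizer: no split()/strip() calls.
--     # cur holds the token built so far (leading whitespace never enters it),
--     # pend holds a run of whitespace that is kept only if more non-space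
--     # characters follow (so trailing whitespace is dropped).
--     out: list[str] = []
--     for value in raw_values:
--         cur: list[str] = []
--         pend: list[str] = []
--         for ch in value:
--             if ch == ',':
--                 if cur:
--                     out.append(''.join(cur))
--                 cur = []
--                 pend = []
--             elif ch.isspace():
--                 if cur:
--                     pend.append(ch)
--             else:
--                 cur += pend
--                 pend = []
--                 cur.append(ch)
--         if cur:
--             out.append(''.join(cur))
--     return out
-- ===== Notes on version B (the rewrite author's own statement) =====
-- stated objective: alternative
-- what changed: Replaces A's split-then-strip pipeline (str.split(',') plus str.strip() per part) with a single character-level scan per value: an explicit tokenizer state machine with a current-token buffer and a pending-whitespace buffer that flushes tokens at commas and end of value, never calling split or strip.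
import Mathlib
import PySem

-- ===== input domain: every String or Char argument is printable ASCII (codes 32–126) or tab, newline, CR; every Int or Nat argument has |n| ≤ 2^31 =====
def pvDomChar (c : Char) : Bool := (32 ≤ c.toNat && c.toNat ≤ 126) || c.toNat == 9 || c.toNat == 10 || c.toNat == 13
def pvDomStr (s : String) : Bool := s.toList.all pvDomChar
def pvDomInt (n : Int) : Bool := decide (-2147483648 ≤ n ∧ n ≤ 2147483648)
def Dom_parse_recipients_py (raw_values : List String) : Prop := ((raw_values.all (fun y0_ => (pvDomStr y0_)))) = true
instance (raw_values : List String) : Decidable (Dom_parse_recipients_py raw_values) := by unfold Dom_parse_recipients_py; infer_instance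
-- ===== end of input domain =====

-- B replaces A's split-then-strip pipeline with a single character-level tokenizer
-- (current-token buffer + pending-whitespace buffer), same cost, no split/strip calls.

-- ===== PORT A =====
-- 'value.split(",")': the separator is the non-empty literal ",", so PySem.Str.split? is always 'some'; '.getD []' is exact here.
def parse_recipients_py (raw_values : List String) : List String :=
  raw_values.foldl
    (fun recipients value =>
      ((PySem.Str.split? value ",").getD []).foldl
        (fun recipients part =>
          let email := PySem.Str.strip part
          if email ≠ "" then recipients ++ [email] else recipients)
        recipients)
    []

-- ===== PORT B =====
-- inner character loop of Source B: cur = token so far, pend = pending whitespace run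
def pvTokGo : List Char → List Char → List Char → List String → List String
  | [], cur, _, out => if cur ≠ [] then out ++ [String.ofList cur] else out
  | c :: rest, cur, pend, out =>
    if c = ',' then
      pvTokGo rest [] [] (if cur ≠ [] then out ++ [String.ofList cur] else out)
    else if PySem.Chars.isspace c then
      pvTokGo rest cur (if cur ≠ [] then pend ++ [c] else pend) out
    else
      pvTokGo rest (cur ++ pend ++ [c]) [] out

def parse_recipients_py_alt (raw_values : List String) : List String :=
  raw_values.foldl (fun out value => pvTokGo value.toList [] [] out) []

-- ===== PRECONDITION & SPEC =====
def Spec_parse_recipients_py (raw_values : List String) (out : List String) : Prop := out = parse_recipients_py_alt raw_values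
instance (raw_values : List String) (out : List String) : Decidable (Spec_parse_recipients_py raw_values out) := by unfold Spec_parse_recipients_py; infer_instance

-- ===== CLAIM (what is proved, stated in full; the proofs are below) =====
def Claim_equal_parse_recipients_py : Prop := ∀ (raw_values : List String), Dom_parse_recipients_py raw_values → Spec_parse_recipients_py raw_values (parse_recipients_py raw_values)

-- ===== LEMMAS AND PROOFS =====

-- Structural recursion computing s.split(",") (Python semantics, single-char separator).
def mySplit : List Char → List (List Char)
  | [] => [[]]
  | c :: rest => if c = ',' then [] :: mySplit rest else (mySplit rest).modifyHead (c :: ·)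

lemma mySplit_ne_nil (s : List Char) : mySplit s ≠ [] := by
  cases s with
  | nil => simp [mySplit]
  | cons c rest =>
    simp only [mySplit]
    split_ifs
    · simp
    · cases h : mySplit rest with
      | nil => exact absurd h (mySplit_ne_nil rest)
      | cons a t => simp

def prependFirst (p : List Char) : List (List Char) → List (List Char)
  | [] => [p]
  | h :: t => (p ++ h) :: t

lemma go_spec (fuel : Nat) (l cur : List Char) (acc : List (List Char)) (h : l.length ≤ fuel) :
    PySem.Chars.splitOn.go [','] fuel l cur acc = acc.reverse ++ prependFirst cur.reverse (mySplit l) := by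
  induction fuel generalizing l cur acc with
  | zero =>
    have hl : l = [] := by cases l <;> simp_all
    subst hl
    simp [PySem.Chars.splitOn.go, mySplit, prependFirst]
  | succ n ih =>
    cases l with
    | nil => simp [PySem.Chars.splitOn.go, mySplit, prependFirst]
    | cons c rest =>
      simp only [PySem.Chars.splitOn.go]
      by_cases hc : c = ','
      · subst hc
        rw [if_pos (by simp [List.isPrefixOf])]
        rw [ih _ _ _ (by simpa using Nat.le_of_succ_le_succ h)]
        cases hm : mySplit rest with
        | nil => exact absurd hm (mySplit_ne_nil rest)
        | cons a t => simp [mySplit, hm, prependFirst]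
      · rw [if_neg (by simp [List.isPrefixOf]; exact fun he => absurd he.symm hc)]
        rw [ih _ _ _ (by simpa using Nat.le_of_succ_le_succ h)]
        cases hm : mySplit rest with
        | nil => exact absurd hm (mySplit_ne_nil rest)
        | cons a t => simp [mySplit, hm, hc, prependFirst]

lemma splitOn_comma (s : List Char) : PySem.Chars.splitOn s [','] = mySplit s := by
  rw [PySem.Chars.splitOn, go_spec _ _ _ _ (by omega)]
  cases hm : mySplit s with
  | nil => exact absurd hm (mySplit_ne_nil s)
  | cons a t => simp [prependFirst]

-- the Str-level split used by port A, reduced to mySplit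
lemma split_comma_eq (v : String) :
    (PySem.Str.split? v ",").getD [] = (mySplit v.toList).map String.ofList := by
  have : (",").toList = [','] := rfl
  simp [PySem.Str.split?, PySem.Chars.split?, this, splitOn_comma]

lemma innerA (parts : List String) (r : List String) :
    parts.foldl
      (fun recipients part =>
        let email := PySem.Str.strip part
        if email ≠ "" then recipients ++ [email] else recipients) r
    = r ++ (parts.map PySem.Str.strip).filter (fun e => e ≠ "") := by
  induction parts generalizing r with
  | nil => simp
  | cons p t ih =>
    simp only [List.foldl_cons, List.map_cons, List.filter_cons]
    rw [ih]
    by_cases hp : PySem.Str.strip p = "" <;> simp [hp]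

lemma outerA (raw : List String) :
    parse_recipients_py raw =
      raw.flatMap (fun v => (((PySem.Str.split? v ",").getD []).map PySem.Str.strip).filter (fun e => e ≠ "")) := by
  show List.foldl _ [] raw = _
  rw [PySem.List.foldl_congr_mem raw _
      (fun recipients value =>
        recipients ++ (((PySem.Str.split? value ",").getD []).map PySem.Str.strip).filter (fun e => e ≠ "")) []
      (fun acc v _ => innerA _ acc)]
  exact PySem.List.foldl_append_eq_flatMap _ raw []

-- ---- B-side: the tokenizer equals strip-filter over mySplit segments ----

def segTokens (segs : List (List Char)) : List String :=
  (segs.map (fun h => String.ofList (PySem.Chars.strip h))).filter (fun e => e ≠ "")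

def optTok (t : List Char) : List String := if t = [] then [] else [String.ofList t]

lemma rstrip_all_ws (p : List Char) (hp : ∀ c ∈ p, PySem.Chars.isspace c = true) :
    PySem.Chars.rstrip p = [] := by
  simp [PySem.Chars.rstrip, List.dropWhile_eq_nil_iff]
  intro c hc; exact hp c hc

lemma rstrip_cons_not_ws (c : Char) (xs : List Char) (hc : PySem.Chars.isspace c = false) :
    PySem.Chars.rstrip (c :: xs) = c :: PySem.Chars.rstrip xs := by
  simp only [PySem.Chars.rstrip, List.reverse_cons, List.dropWhile_append]
  split_ifs with h
  · simp only [List.isEmpty_iff] at h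
    simp [h, List.dropWhile, hc]
  · simp

lemma rstrip_append_ws_left (p b : List Char)
    (hb : PySem.Chars.rstrip b ≠ []) :
    PySem.Chars.rstrip (p ++ b) = p ++ PySem.Chars.rstrip b := by
  simp only [PySem.Chars.rstrip, List.reverse_append, List.dropWhile_append]
  split_ifs with h
  · have h0 : List.dropWhile PySem.Chars.isspace b.reverse = [] := List.isEmpty_iff.mp h
    have hb0 : PySem.Chars.rstrip b = [] := by
      unfold PySem.Chars.rstrip
      rw [h0]
      rfl
    exact absurd hb0 hb
  · simp

lemma strip_cons_ws (c : Char) (h : List Char) (hc : PySem.Chars.isspace c = true) :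
    PySem.Chars.strip (c :: h) = PySem.Chars.strip h := by
  simp [PySem.Chars.strip, PySem.Chars.lstrip, List.dropWhile, hc]

lemma strip_cons_not_ws (c : Char) (h : List Char) (hc : PySem.Chars.isspace c = false) :
    PySem.Chars.strip (c :: h) = c :: PySem.Chars.rstrip h := by
  simp [PySem.Chars.strip, PySem.Chars.lstrip, List.dropWhile, hc, rstrip_cons_not_ws c h hc]

lemma segTokens_cons (h : List Char) (t : List (List Char)) :
    segTokens (h :: t) = optTok (PySem.Chars.strip h) ++ segTokens t := by
  simp only [segTokens, optTok, List.map_cons, List.filter_cons]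
  by_cases hh : PySem.Chars.strip h = []
  · simp [hh]
  · have hne : String.ofList (PySem.Chars.strip h) ≠ "" := by
      intro he
      apply hh
      have := congrArg String.toList he
      simpa using this
    simp [hne, hh]

lemma tokGo_spec (cs : List Char) :
    ∀ (cur pend : List Char) (out : List String) (h : List Char) (t : List (List Char)),
      mySplit cs = h :: t →
      (∀ c ∈ pend, PySem.Chars.isspace c = true) →
      (cur = [] → pend = []) →
      pvTokGo cs cur pend out =
        out ++ optTok (if cur = [] then PySem.Chars.strip h
                        else cur ++ PySem.Chars.rstrip (pend ++ h)) ++ segTokens t := by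
  induction cs with
  | nil =>
    intro cur pend out h t hsplit hp hcp
    have hh : h = [] ∧ t = [] := by
      simpa [mySplit] using hsplit.symm
    obtain ⟨rfl, rfl⟩ := hh
    by_cases hc : cur = []
    · subst hc
      simp [pvTokGo, optTok, segTokens, PySem.Chars.strip, PySem.Chars.lstrip, PySem.Chars.rstrip]
    · have hr : PySem.Chars.rstrip pend = [] := rstrip_all_ws pend hp
      simp [pvTokGo, hc, hr, optTok, segTokens]
  | cons c rest ih =>
    intro cur pend out h t hsplit hp hcp
    by_cases hcomma : c = ','
    · subst hcomma
      rw [show mySplit (',' :: rest) = [] :: mySplit rest from by simp [mySplit]] at hsplit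
      injection hsplit with h1 h2
      subst h1; subst h2
      cases hrest : mySplit rest with
      | nil => exact absurd hrest (mySplit_ne_nil rest)
      | cons h' t' =>
        rw [show pvTokGo (',' :: rest) cur pend out
              = pvTokGo rest [] [] (if cur ≠ [] then out ++ [String.ofList cur] else out) from by
            simp [pvTokGo]]
        rw [ih [] [] _ h' t' hrest (by simp) (fun _ => rfl)]
        rw [segTokens_cons h' t']
        have hs0 : PySem.Chars.strip ([] : List Char) = [] := rfl
        by_cases hc : cur = []
        · simp [hc, hs0, optTok]
        · have hr : PySem.Chars.rstrip pend = [] := rstrip_all_ws pend hp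
          simp [hc, hr, optTok]
    · obtain ⟨h', t', hm⟩ : ∃ h' t', mySplit rest = h' :: t' := by
        cases hm : mySplit rest with
        | nil => exact absurd hm (mySplit_ne_nil rest)
        | cons a b => exact ⟨a, b, rfl⟩
      rw [show mySplit (c :: rest) = (c :: h') :: t' from by
            simp [mySplit, hcomma, hm, List.modifyHead]] at hsplit
      injection hsplit with h1 h2
      subst h1; subst h2
      by_cases hws : PySem.Chars.isspace c = true
      · -- whitespace char
        simp only [pvTokGo, if_neg hcomma, if_pos hws]
        by_cases hc : cur = []
        · have hpe : pend = [] := hcp hc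
          subst hc; subst hpe
          rw [if_neg (by simp)]
          rw [ih [] [] _ h' t' hm (by simp) (fun _ => rfl)]
          simp [strip_cons_ws c h' hws]
        · rw [if_pos hc]
          rw [ih cur (pend ++ [c]) _ h' t' hm
              (by intro x hx
                  rcases List.mem_append.mp hx with h1 | h1
                  · exact hp x h1
                  · simp at h1; subst h1; exact hws)
              (fun he => absurd he hc)]
          have hassoc : pend ++ c :: h' = (pend ++ [c]) ++ h' := by simp
          rw [if_neg hc, if_neg hc, hassoc]
      · -- non-whitespace char
        have hws' : PySem.Chars.isspace c = false := by
          cases hb : PySem.Chars.isspace c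
          · rfl
          · exact absurd hb hws
        simp only [pvTokGo, if_neg hcomma]
        rw [if_neg (show ¬(PySem.Chars.isspace c = true) from by simp [hws'])]
        rw [ih (cur ++ pend ++ [c]) [] _ h' t' hm (by simp) (by simp)]
        by_cases hc : cur = []
        · have hpe : pend = [] := hcp hc
          subst hc; subst hpe
          simp [strip_cons_not_ws c h' hws']
        · have hb : PySem.Chars.rstrip (c :: h') ≠ [] := by
            rw [rstrip_cons_not_ws c h' hws']; simp
          have hra : PySem.Chars.rstrip (pend ++ c :: h') = pend ++ PySem.Chars.rstrip (c :: h') :=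
            rstrip_append_ws_left pend (c :: h') hb
          simp [hc, hra, rstrip_cons_not_ws c h' hws', optTok]

lemma tokValue (v : String) (out : List String) :
    pvTokGo v.toList [] [] out = out ++ segTokens (mySplit v.toList) := by
  cases hm : mySplit v.toList with
  | nil => exact absurd hm (mySplit_ne_nil _)
  | cons h t =>
    rw [tokGo_spec v.toList [] [] out h t hm (by simp) (fun _ => rfl)]
    rw [segTokens_cons h t]
    simp

lemma strip_ofList (h : List Char) :
    PySem.Str.strip (String.ofList h) = String.ofList (PySem.Chars.strip h) := by
  apply String.ext
  simp [PySem.Str.toList_strip]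

lemma segA (v : String) :
    (((PySem.Str.split? v ",").getD []).map PySem.Str.strip).filter (fun e => e ≠ "")
      = segTokens (mySplit v.toList) := by
  rw [split_comma_eq, List.map_map, segTokens]
  congr 1
  apply List.map_congr_left
  intro h _
  exact strip_ofList h

lemma outerB (raw : List String) :
    parse_recipients_py_alt raw = raw.flatMap (fun v => segTokens (mySplit v.toList)) := by
  show List.foldl _ [] raw = _
  rw [PySem.List.foldl_congr_mem raw _
      (fun out v => out ++ segTokens (mySplit v.toList)) []
      (fun acc v _ => tokValue v acc)]
  exact PySem.List.foldl_append_eq_flatMap _ raw []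

lemma main_eq (raw : List String) : parse_recipients_py raw = parse_recipients_py_alt raw := by
  rw [outerA, outerB]
  exact List.flatMap_congr (fun v _ => segA v)

-- ===== VERDICT (by name: the statement is the Claim_ definition above) =====
theorem parse_recipients_py_spec : Claim_equal_parse_recipients_py := by
  intro raw _
  show _ = _
  exact main_eq raw
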